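-- pv_equiv track=rewrite | github.com/14TH-ALGORITHM-STUDY/SSAFY | October/251022/251022_김규민.py | solve
-- ===== SOURCE A (Python) =====
-- from collections import deque
--
-- def solve(N, K, Ai):
--     belt = deque(Ai)
--     robot = deque([False] * N) # N번째에서 로봇 내림
--     cnt = 0
--
--     while True:
--         cnt += 1
--
--         v_belt = belt.pop()
--         belt.appendleft(v_belt)
--         v_robot = robot.pop()
--         robot.appendleft(v_robot)
--         robot[-1] = False
--
--         for i in range(N-2, -1, -1): # N번째 컨베이어 인덱스 N-1임. 내리는칸.
--             #현재칸에 로봇이 있고, 다음칸에 로봇 없고, 내구도가 1 이상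
--             if robot[i] and not robot[i +1] and belt[i+1]>0:
--                 robot[i] = False #다음칸으로 로봇이가서 현재칸 빔
--                 robot[i+1] = True #로봇이 와서 차있음
--                 belt[i+1] -= 1 #내구도 감소
--         robot[-1] = False #N번째 칸에서 로봇이 내림
--
--         # 로봇 올리기
--         if belt[0] >0:
--             robot[0] = True
--             belt[0] -= 1
--
--         if belt.count(0) >= K:
--             return cnt
-- ===== SOURCE B (Python) =====
-- def solve(N, K, Ai):
--     # Robot-centric simulation: instead of a boolean occupancy deque swept over all
--     # N cells each step, keep only the ordered list of robot positions (front first)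
--     # and advance each robot in one pass; the belt stays a fixed list addressed by
--     # (cell - step) % len, and the worn-out-cell count is maintained incrementally.
--     M = len(Ai)
--     belt = list(Ai)
--     zeros = belt.count(0)
--     robots = []          # positions of robots on the belt, strictly decreasing
--     t = 0                # steps taken; cell j currently holds belt[(j - t) % M]
--     while True:
--         t += 1
--         moved = []
--         prev = N         # final position of the robot ahead (N = no robot ahead)
--         for p in robots:
--             q = p + 1                 # the belt turn carries every robot one cell
--             if q >= N - 1:
--                 continue              # reached the unload cell: robot leaves
--             r = q + 1
--             if r != prev:             # cell ahead is free
--                 j = (r - t) % M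
--                 if belt[j] > 0:       # and still durable: robot steps forward
--                     belt[j] -= 1
--                     if belt[j] == 0:
--                         zeros += 1
--                     q = r
--             prev = q
--             if q != N - 1:            # a robot stepping onto the unload cell leaves
--                 moved.append(q)
--         j = (-t) % M
--         if belt[j] > 0:               # load a fresh robot at cell 0
--             belt[j] -= 1
--             if belt[j] == 0:
--                 zeros += 1
--             moved.append(0)
--         robots = moved
--         if zeros >= K:
--             return t
-- ===== Notes on version B (the rewrite author's own statement) =====
-- stated objective: alternative
-- what changed: Replaces the dense simulation (a boolean robot deque of length N rotated and swept over all N cells each step, plus a full belt.count(0) rescan) by a sparse robot-centric one: only the ordered list of robot positions is kept and advanced in a single pass per step using the robot ahead's final position to detect blocking, the belt is a fixed list addressed by (cell - step) % len, and the worn-out-cell count is maintained incrementally.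
-- outside the precondition, e.g. on solve(4, 1, [1, 0]): A returns 1, B returns 1; on solve(5, 1, [0, 3]): A returns 1, B returns 1
import Mathlib
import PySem

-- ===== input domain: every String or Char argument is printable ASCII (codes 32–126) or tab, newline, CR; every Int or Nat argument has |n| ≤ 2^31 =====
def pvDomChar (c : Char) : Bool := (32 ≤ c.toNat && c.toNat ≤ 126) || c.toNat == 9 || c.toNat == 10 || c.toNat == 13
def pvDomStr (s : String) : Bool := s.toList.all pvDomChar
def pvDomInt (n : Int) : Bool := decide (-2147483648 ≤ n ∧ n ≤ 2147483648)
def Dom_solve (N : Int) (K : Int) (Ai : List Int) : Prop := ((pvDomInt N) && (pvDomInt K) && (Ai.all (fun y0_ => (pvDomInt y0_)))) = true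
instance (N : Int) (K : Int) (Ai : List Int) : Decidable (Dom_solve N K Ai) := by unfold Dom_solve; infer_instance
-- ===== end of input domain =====

-- B replaces A's dense simulation (boolean robot deque rotated and swept over all N cells,
-- plus a belt.count(0) rescan each step) by a sparse robot-centric one: only the ordered
-- list of robot positions is advanced each step, the belt is a fixed list addressed by
-- (cell - step) % len, and the worn-out-cell count is kept incrementally
-- (objective: alternative algorithmic decomposition, similar cost).

-- shared fuel guard: a conservative upper bound on the number of steps A performs before it
-- returns (inside Pre_solve); it only makes the loops total and carries no algorithmic content
def pvFuel (N : Int) (Ai : List Int) : Nat :=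
  (N.toNat + Ai.length + 1) * ((Ai.foldl (fun s x => s + max x 0) 0).toNat + 2) + 1

-- ===== PORT A =====
-- all indices used below are nonnegative and, under Pre_solve, in range, so plain
-- getD/set with .toNat is exact for the corresponding Python indexing there
def innerA (st : List Int × List Bool) (i : Int) : List Int × List Bool :=
  if st.2.getD i.toNat false = true ∧ st.2.getD (i+1).toNat false = false ∧
      0 < st.1.getD (i+1).toNat 0 then
    (st.1.set (i+1).toNat (st.1.getD (i+1).toNat 0 - 1),
     (st.2.set i.toNat false).set (i+1).toNat true)
  else st

-- one iteration of A's while-True body (without the final count check)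
def stepA (N : Int) (belt0 : List Int) (robot0 : List Bool) : List Int × List Bool :=
  let belt1 := belt0.getLastD 0 :: belt0.dropLast          -- belt.pop(); belt.appendleft
  let robot1 := robot0.getLastD false :: robot0.dropLast   -- robot.pop(); robot.appendleft
  let robot2 := robot1.set (robot1.length - 1) false       -- robot[-1] = False
  let st := (PySem.List.pyRange (N-2) (-1) (-1)).foldl innerA (belt1, robot2)
  let robot3 := st.2.set (st.2.length - 1) false           -- robot[-1] = False
  if 0 < st.1.getD 0 0 then (st.1.set 0 (st.1.getD 0 0 - 1), robot3.set 0 true)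
  else (st.1, robot3)

def loopA (N K : Int) : Nat → List Int → List Bool → Int → Int
  | 0, _, _, _ => 0
  | fuel+1, belt0, robot0, cnt0 =>
    let p := stepA N belt0 robot0
    if K ≤ (p.1.count 0 : Int) then cnt0 + 1
    else loopA N K fuel p.1 p.2 (cnt0 + 1)

def solve (N : Int) (K : Int) (Ai : List Int) : Int :=
  loopA N K (pvFuel N Ai) Ai (List.replicate N.toNat false) 0

-- ===== PORT B =====
-- state: (belt, zeros, moved, prev); one robot of the per-step for-loop of Source B
def stepRobotB (N M t : Int) (st : List Int × Int × List Int × Int) (p : Int) :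
    List Int × Int × List Int × Int :=
  let q := p + 1
  if N - 1 ≤ q then st                                     -- reached the unload cell
  else
    let r := q + 1
    if r ≠ st.2.2.2 then
      let j := (PySem.Int.mod (r - t) M).toNat
      let v := st.1.getD j 0
      if 0 < v then
        (st.1.set j (v - 1), (if v - 1 = 0 then st.2.1 + 1 else st.2.1),
         (if r ≠ N - 1 then st.2.2.1 ++ [r] else st.2.2.1), r)
      else (st.1, st.2.1, (if q ≠ N - 1 then st.2.2.1 ++ [q] else st.2.2.1), q)
    else (st.1, st.2.1, (if q ≠ N - 1 then st.2.2.1 ++ [q] else st.2.2.1), q)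

def loopB (N K M : Int) : Nat → List Int → Int → List Int → Int → Int
  | 0, _, _, _, _ => 0
  | fuel+1, belt, zeros, robots, t0 =>
    let t := t0 + 1
    let st := robots.foldl (stepRobotB N M t) (belt, zeros, [], N)
    let j := (PySem.Int.mod (-t) M).toNat
    let v := st.1.getD j 0
    let belt' := if 0 < v then st.1.set j (v - 1) else st.1
    let zeros' := if 0 < v then (if v - 1 = 0 then st.2.1 + 1 else st.2.1) else st.2.1
    let robots' := if 0 < v then st.2.2.1 ++ [(0:Int)] else st.2.2.1
    if K ≤ zeros' then t
    else loopB N K M fuel belt' zeros' robots' t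

def solve_alt (N : Int) (K : Int) (Ai : List Int) : Int :=
  loopB N K (Ai.length : Int) (pvFuel N Ai) Ai (Ai.count 0 : Int) [] 0

-- ===== PRECONDITION & SPEC =====
-- Pre_solve excludes: N ≤ 0 or an empty durability list (A pops an empty deque:
-- IndexError); K exceeding the number of cells with nonnegative durability, where A's
-- while-True loop never terminates; and, when the list is shorter than N with K > 0,
-- inputs on which A's scan may hit belt[i] with i ≥ len(Ai) (IndexError) before K cells
-- wear out — whether it raises or returns there depends on the simulation itself, so the
-- whole region is excluded even though A still returns a value on part of it.
def Pre_solve (N : Int) (K : Int) (Ai : List Int) : Prop :=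
  1 ≤ N ∧ 1 ≤ (Ai.length : Int) ∧ K ≤ ((Ai.filter (fun x => 0 ≤ x)).length : Int) ∧
    (N ≤ (Ai.length : Int) ∨ K ≤ 0)
instance (N : Int) (K : Int) (Ai : List Int) : Decidable (Pre_solve N K Ai) := by
  unfold Pre_solve; infer_instance

def pvWitness_solve : Int × Int × List Int := (3, 2, [1, 0, 2])

def Spec_solve (N : Int) (K : Int) (Ai : List Int) (out : Int) : Prop := out = solve_alt N K Ai
instance (N : Int) (K : Int) (Ai : List Int) (out : Int) : Decidable (Spec_solve N K Ai out) := by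
  unfold Spec_solve; infer_instance

-- ===== CLAIM (what is proved, stated in full; the proofs are below) =====
def Claim_equal_solve : Prop := ∀ (N : Int) (K : Int) (Ai : List Int),
  Dom_solve N K Ai → Pre_solve N K Ai → Spec_solve N K Ai (solve N K Ai)

-- ===== LEMMAS AND PROOFS =====

-- proof-side twin of stepRobotB after the belt turn has been applied to the position
def moveStep (N M t : Int) (st : List Int × Int × List Int × Int) (q : Int) :
    List Int × Int × List Int × Int :=
  let r := q + 1
  if r ≠ st.2.2.2 then
    let j := (PySem.Int.mod (r - t) M).toNat
    let v := st.1.getD j 0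
    if 0 < v then
      (st.1.set j (v - 1), (if v - 1 = 0 then st.2.1 + 1 else st.2.1),
       (if r ≠ N - 1 then st.2.2.1 ++ [r] else st.2.2.1), r)
    else (st.1, st.2.1, (if q ≠ N - 1 then st.2.2.1 ++ [q] else st.2.2.1), q)
  else (st.1, st.2.1, (if q ≠ N - 1 then st.2.2.1 ++ [q] else st.2.2.1), q)

def Qof (N : Int) (P : List Int) : List Int :=
  (P.map (· + 1)).filter (fun q => decide (q < N - 1))

theorem fold_stepRobot_eq (N M t : Int) :
    ∀ (P : List Int) (st : List Int × Int × List Int × Int),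
      P.foldl (stepRobotB N M t) st = (Qof N P).foldl (moveStep N M t) st := by
  intro P
  induction P with
  | nil => intro st; rfl
  | cons p P ih =>
    intro st
    by_cases h : N - 1 ≤ p + 1
    · have h1 : stepRobotB N M t st p = st := by
        simp only [stepRobotB, if_pos h]
      have h2 : Qof N (p :: P) = Qof N P := by
        simp only [Qof, List.map_cons, List.filter_cons]
        rw [if_neg (by simp; omega)]
      rw [List.foldl_cons, h1, h2, ih]
    · have h2 : Qof N (p :: P) = (p + 1) :: Qof N P := by
        simp only [Qof, List.map_cons, List.filter_cons]
        rw [if_pos (by simp; omega)]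
      have h1 : stepRobotB N M t st p = moveStep N M t st (p + 1) := by
        simp only [stepRobotB, if_neg h, moveStep]
      rw [List.foldl_cons, h1, h2, List.foldl_cons, ih]

theorem rot_last {α : Type} (l : List α) (d : α) (h : l ≠ []) :
    l.getLastD d :: l.dropLast = l.rotate (l.length - 1) := by
  rw [List.rotate_eq_drop_append_take (by omega)]
  rw [List.dropLast_eq_take]
  have h1 : l.drop (l.length - 1) = [l.getLast h] := by
    rw [List.drop_length_sub_one h]
  rw [h1, List.getLastD_eq_getLast?, List.getLast?_eq_some_getLast h]
  rfl

theorem getD_rotate {α : Type} (l : List α) (k i : Nat) (hi : i < l.length) (d : α) :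
    (l.rotate k).getD i d = l.getD ((i + k) % l.length) d := by
  have hL : 0 < l.length := by omega
  have h2 : (i + k) % l.length < l.length := Nat.mod_lt _ hL
  rw [List.getD_eq_getElem _ _ (by simpa using hi), List.getD_eq_getElem _ _ h2]
  exact List.getElem_rotate l k i _

theorem rotate_set {α : Type} (l : List α) (k i : Nat) (hi : i < l.length) (v : α) :
    (l.set ((i + k) % l.length) v).rotate k = (l.rotate k).set i v := by
  have hL : 0 < l.length := by omega
  apply List.ext_getElem
  · simp
  · intro j h1 h2
    have hj : j < l.length := by simpa using h1
    rw [List.getElem_rotate]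
    rw [List.getElem_set, List.getElem_set, List.getElem_rotate]
    simp only [List.length_set]
    by_cases hij : i = j
    · subst hij; simp
    · rw [if_neg, if_neg hij]
      intro hc
      have hm : i ≡ j [MOD l.length] := (Nat.ModEq.add_right_cancel' k hc)
      exact hij ((Nat.mod_eq_of_lt hi) ▸ (Nat.mod_eq_of_lt hj) ▸ hm)

theorem modIdx (N off i : Int) (hN : 0 < N) (h0 : 0 ≤ off) (hi : 0 ≤ i) :
    (PySem.Int.mod (off + i) N).toNat = (i.toNat + off.toNat) % N.toNat := by
  rw [show off + i = ((i.toNat + off.toNat : Nat) : Int) by omega,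
      show N = (N.toNat : Int) by omega, PySem.Int.mod_natCast]
  exact Int.toNat_natCast _

theorem count_after_dec (l : List Int) (j : Nat) (hj : j < l.length) (hpos : 0 < l.getD j 0) :
    ((l.set j (l.getD j 0 - 1)).count 0 : Int)
      = (l.count 0 : Int) + (if l.getD j 0 - 1 = 0 then 1 else 0) := by
  have hget : l[j] = l.getD j 0 := (List.getD_eq_getElem l 0 hj).symm
  rw [List.count_set hj, hget]
  have hne : ¬ (l.getD j 0 = 0) := by omega
  simp only [beq_iff_eq, hne, if_false, Nat.sub_zero]
  split_ifs with h <;> push_cast <;> omega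

theorem count_rotate_int (l : List Int) (k : Nat) : (l.rotate k).count 0 = l.count 0 :=
  (List.rotate_perm l k).count_eq 0

theorem ob_nonneg (M t : Int) (hM : 0 < M) : 0 ≤ PySem.Int.mod (-t) M := by
  rw [PySem.Int.mod_eq_emod_of_pos hM]; exact Int.emod_nonneg _ (by omega)

theorem ob_lt (M t : Int) (hM : 0 < M) : PySem.Int.mod (-t) M < M := by
  rw [PySem.Int.mod_eq_emod_of_pos hM]; exact Int.emod_lt_of_pos _ hM

-- index translation: B's (r - t) % M address equals A's rotated-list address
theorem idx_shift (M t r : Int) (hM : 0 < M) (hr : 0 ≤ r) :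
    (PySem.Int.mod (r - t) M).toNat
      = (r.toNat + (PySem.Int.mod (-t) M).toNat) % M.toNat := by
  have hob0 : 0 ≤ PySem.Int.mod (-t) M := ob_nonneg M t hM
  rw [← modIdx M (PySem.Int.mod (-t) M) r hM hob0 hr]
  congr 1
  rw [PySem.Int.mod_eq_emod_of_pos hM, PySem.Int.mod_eq_emod_of_pos hM,
      PySem.Int.mod_eq_emod_of_pos hM]
  have hq : (-t) % M = -t - M * (-t / M) := by
    have := Int.emod_add_mul_ediv (-t) M
    omega
  rw [show (-t) % M + r = (r - t) + M * (-(-t / M)) by rw [hq]; ring]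
  rw [Int.add_mul_emod_self_left]

-- offset advance: (-t0) % M rotated one more step is (-(t0+1)) % M
theorem ob_advance (M t0 : Int) (hM : 0 < M) :
    PySem.Int.mod (PySem.Int.mod (-t0) M - 1) M = PySem.Int.mod (-(t0+1)) M := by
  rw [PySem.Int.mod_eq_emod_of_pos hM, PySem.Int.mod_eq_emod_of_pos hM,
      PySem.Int.mod_eq_emod_of_pos hM]
  conv_rhs => rw [show -(t0+1) = -t0 - 1 by ring, Int.sub_emod]
  rw [Int.sub_emod, Int.emod_emod_of_dvd _ dvd_rfl]

theorem off_advance (N off : Int) (hN : 0 < N) (h0 : 0 ≤ off) (h1 : off < N) :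
    (off.toNat + (N.toNat - 1)) % N.toNat = (PySem.Int.mod (off - 1) N).toNat := by
  have hemod : PySem.Int.mod (off - 1) N = (off - 1) % N := PySem.Int.mod_eq_emod_of_pos hN
  by_cases hz0 : off = 0
  · have hm1 : ((0 : Int) - 1) % N = N - 1 := by
      conv_lhs => rw [show (0:Int) - 1 = (N - 1) + N * (-1) by ring]
      rw [Int.add_mul_emod_self_left]
      exact Int.emod_eq_of_lt (by omega) (by omega)
    rw [hemod, hz0, hm1]
    simp only [Int.toNat_zero, Nat.zero_add]
    rw [Nat.mod_eq_of_lt (by omega)]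
    omega
  · have hoo : (off - 1) % N = off - 1 := Int.emod_eq_of_lt (by omega) (by omega)
    rw [hemod, hoo,
        show off.toNat + (N.toNat - 1) = (off.toNat - 1) + N.toNat by omega,
        Nat.add_mod_right, Nat.mod_eq_of_lt (by omega)]
    omega

theorem rot_advance {α : Type} (l : List α) (d : α) (L off : Int) (hL : 0 < L)
    (h0 : 0 ≤ off) (h1 : off < L) (hl : l.length = L.toNat) :
    (l.rotate off.toNat).getLastD d :: (l.rotate off.toNat).dropLast
      = l.rotate (PySem.Int.mod (off - 1) L).toNat := by
  have hne : (l.rotate off.toNat) ≠ [] := by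
    intro hnil
    have h2 := congrArg List.length hnil
    simp only [List.length_rotate, List.length_nil] at h2
    omega
  rw [rot_last _ _ hne, List.length_rotate, List.rotate_rotate, hl]
  conv_lhs => rw [← List.rotate_mod]
  rw [hl, off_advance L off hL h0 h1]

theorem getD_set' {α : Type} (l : List α) (k j : Nat) (v d : α) (hj : j < l.length) :
    (l.set k v).getD j d = if k = j then v else l.getD j d := by
  rw [List.getD_eq_getElem _ _ (by simpa using hj), List.getElem_set]
  split_ifs with h
  · rfl
  · exact (List.getD_eq_getElem _ _ hj).symm

theorem mem_Qof (N x : Int) (P : List Int) : x ∈ Qof N P ↔ ((x - 1) ∈ P ∧ x < N - 1) := by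
  simp only [Qof, List.mem_filter, List.mem_map, decide_eq_true_eq]
  constructor
  · rintro ⟨⟨a, ha, rfl⟩, h2⟩
    exact ⟨by simpa using ha, h2⟩
  · rintro ⟨h1, h2⟩
    exact ⟨⟨x - 1, h1, by ring⟩, h2⟩

-- the sweep: A's index fold over range(N-2,-1,-1) against B's fold over the robot queue
theorem sweep_rel (N M t : Int) (hN : 0 < N) (hM : 0 < M) (hNM : N ≤ M) :
    ∀ (n : Nat) (Q C moved : List Int) (beltB : List Int) (occ : List Bool)
      (zeros prev : Int),
    beltB.length = M.toNat →
    occ.length = N.toNat →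
    (∀ j : Nat, j < N.toNat → occ.getD j false = decide ((j:Int) ∈ C ++ Q)) →
    List.Pairwise (· > ·) (C ++ Q) →
    (∀ c ∈ C, prev ≤ c ∧ 1 ≤ c ∧ c ≤ N - 1) →
    (C = [] → prev = N) →
    (C ≠ [] → prev ∈ C) →
    (∀ x ∈ Q, 1 ≤ x ∧ x ≤ (n:Int) - 1) →
    (n:Int) ≤ prev →
    (n:Int) - 1 ≤ N - 2 →
    moved = C.filter (fun c => c ≠ N - 1) →
    zeros = (beltB.count 0 : Int) →
    ∃ C' : List Int,
      ((PySem.List.pyRange ((n:Int) - 1) (-1) (-1)).foldl innerA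
          (beltB.rotate (PySem.Int.mod (-t) M).toNat, occ)).1
        = (Q.foldl (moveStep N M t) (beltB, zeros, moved, prev)).1.rotate
            (PySem.Int.mod (-t) M).toNat ∧
      ((PySem.List.pyRange ((n:Int) - 1) (-1) (-1)).foldl innerA
          (beltB.rotate (PySem.Int.mod (-t) M).toNat, occ)).2.length = N.toNat ∧
      (∀ j : Nat, j < N.toNat →
        ((PySem.List.pyRange ((n:Int) - 1) (-1) (-1)).foldl innerA
            (beltB.rotate (PySem.Int.mod (-t) M).toNat, occ)).2.getD j false
          = decide ((j:Int) ∈ C')) ∧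
      (Q.foldl (moveStep N M t) (beltB, zeros, moved, prev)).1.length = M.toNat ∧
      (Q.foldl (moveStep N M t) (beltB, zeros, moved, prev)).2.1
        = ((Q.foldl (moveStep N M t) (beltB, zeros, moved, prev)).1.count 0 : Int) ∧
      (Q.foldl (moveStep N M t) (beltB, zeros, moved, prev)).2.2.1
        = C'.filter (fun c => c ≠ N - 1) ∧
      List.Pairwise (· > ·) C' ∧
      (∀ c ∈ C', 1 ≤ c ∧ c ≤ N - 1) := by
  intro n
  induction n with
  | zero =>
    intro Q C moved beltB occ zeros prev hbl hol hom hpw hC hC0 hCne hQ hprev hn hmv hz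
    have hQnil : Q = [] := by
      cases Q with
      | nil => rfl
      | cons a Q2 =>
        have := hQ a List.mem_cons_self
        simp only [Nat.cast_zero] at this
        omega
    subst hQnil
    rw [PySem.List.pyRange_neg_one_eq_nil (by norm_num)]
    simp only [List.foldl_nil]
    refine ⟨C, trivial, hol, ?_, hbl, hz, hmv, ?_, ?_⟩
    · intro j hj
      have h := hom j hj
      simpa using h
    · simpa using hpw
    · intro c hc
      exact ⟨(hC c hc).2.1, (hC c hc).2.2⟩
  | succ n ihn =>
    intro Q C moved beltB occ zeros prev hbl hol hom hpw hC hC0 hCne hQ hprev hn hmv hz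
    have hNtop : n + 1 < N.toNat := by
      have : ((n+1:Nat):Int) - 1 ≤ N - 2 := hn
      omega
    have hMtop : n + 1 < M.toNat := by omega
    have hprev' : ((n:Int)) + 1 ≤ prev := by
      have : ((n+1:Nat):Int) ≤ prev := hprev
      omega
    rw [show ((n+1:Nat):Int) - 1 = (n:Int) by push_cast; ring,
        PySem.List.pyRange_neg_one_cons (by omega), List.foldl_cons]
    by_cases hmemn : ((n:Int)) ∈ Q
    case neg =>
      have hnotCQ : ((n:Int)) ∉ C ++ Q := by
        rw [List.mem_append]
        rintro (h | h)
        · have := (hC _ h).1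
          omega
        · exact hmemn h
      have hid : innerA (beltB.rotate (PySem.Int.mod (-t) M).toNat, occ) ((n:Int))
          = (beltB.rotate (PySem.Int.mod (-t) M).toNat, occ) := by
        simp only [innerA]
        rw [if_neg]
        rintro ⟨h1, -, -⟩
        rw [show ((n:Int)).toNat = n by omega, hom n (by omega)] at h1
        simp [hnotCQ] at h1
      rw [hid]
      exact ihn Q C moved beltB occ zeros prev hbl hol hom hpw hC hC0 hCne
        (by
          intro x hx
          have h1 := hQ x hx
          have h2 : x ≠ (n:Int) := fun he => hmemn (he ▸ hx)
          push_cast at h1 ⊢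
          omega)
        (by omega) (by omega) hmv hz
    case pos =>
      obtain ⟨Q2, rfl⟩ : ∃ Q2, Q = ((n:Int)) :: Q2 := by
        cases Q with
        | nil => simp at hmemn
        | cons a Q2 =>
          have ha : a ≤ (n:Int) := by
            have := hQ a List.mem_cons_self
            push_cast at this
            omega
          rcases List.mem_cons.mp hmemn with h | h
          · exact ⟨Q2, by rw [h]⟩
          · exfalso
            have hp2 := (List.pairwise_append.mp hpw).2.1
            have := (List.pairwise_cons.mp hp2).1 _ h
            omega
      have hQ2bd : ∀ x ∈ Q2, 1 ≤ x ∧ x ≤ (n:Int) - 1 := by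
        intro x hx
        have h1 := hQ x (List.mem_cons_of_mem _ hx)
        have hp2 := (List.pairwise_append.mp hpw).2.1
        have h2 := (List.pairwise_cons.mp hp2).1 _ hx
        exact ⟨h1.1, by omega⟩
      -- occupancy facts
      have hvn : occ.getD n false = true := by
        rw [hom n (by omega)]
        simp [List.mem_append]
      have hmem_n1 : ((n:Int) + 1 ∈ C ++ (n:Int) :: Q2) ↔ ((n:Int) + 1 = prev) := by
        constructor
        · intro h
          rcases List.mem_append.mp h with h | h
          · have := (hC _ h).1
            omega
          · rcases List.mem_cons.mp h with h | h
            · omega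
            · have := (hQ2bd _ h).2
              omega
        · intro h
          have hCnenil : C ≠ [] := by
            intro hcn
            have := hC0 hcn
            omega
          exact List.mem_append_left _ (h ▸ hCne hCnenil)
      have hvn1 : occ.getD (n+1) false = decide ((n:Int) + 1 = prev) := by
        rw [hom (n+1) hNtop, decide_eq_decide,
            show ((n+1:Nat):Int) = (n:Int) + 1 by push_cast; ring]
        exact hmem_n1
      -- belt index facts
      have hobn : (PySem.Int.mod (-t) M).toNat < M.toNat := by
        have := ob_lt M t hM
        have := ob_nonneg M t hM
        omega
      have hJlt : (n + 1 + (PySem.Int.mod (-t) M).toNat) % M.toNat < M.toNat :=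
        Nat.mod_lt _ (by omega)
      have hbA : (beltB.rotate (PySem.Int.mod (-t) M).toNat).getD (n+1) 0
          = beltB.getD ((n + 1 + (PySem.Int.mod (-t) M).toNat) % M.toNat) 0 := by
        rw [getD_rotate _ _ _ (by rw [hbl]; omega), hbl]
      have hidx : (PySem.Int.mod ((n:Int) + 1 - t) M).toNat
          = (n + 1 + (PySem.Int.mod (-t) M).toNat) % M.toNat := by
        rw [idx_shift M t ((n:Int) + 1) hM (by omega),
            show ((n:Int) + 1).toNat = n + 1 by omega]
      -- the two parallel micro-steps
      rw [List.foldl_cons]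
      by_cases hblock : (n:Int) + 1 = prev
      · -- blocked by the robot ahead: both sides leave everything but prev alone
        have hA : innerA (beltB.rotate (PySem.Int.mod (-t) M).toNat, occ) ((n:Int))
            = (beltB.rotate (PySem.Int.mod (-t) M).toNat, occ) := by
          simp only [innerA]
          rw [if_neg]
          rintro ⟨-, h2, -⟩
          rw [show ((n:Int) + 1).toNat = n + 1 by omega, hvn1] at h2
          simp [hblock] at h2
        have hB : moveStep N M t (beltB, zeros, moved, prev) ((n:Int))
            = (beltB, zeros, moved ++ [(n:Int)], ((n:Int))) := by
          simp only [moveStep]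
          rw [if_neg (by omega), if_pos (show ((n:Int)) ≠ N - 1 by omega)]
        rw [hA, hB]
        exact ihn Q2 (C ++ [(n:Int)]) (moved ++ [(n:Int)]) beltB occ zeros ((n:Int))
          hbl hol
          (by
            intro j hj
            rw [hom j hj, decide_eq_decide, List.append_assoc]
            simp)
          (by rw [List.append_assoc]; simpa using hpw)
          (by
            intro c hc
            rcases List.mem_append.mp hc with h | h
            · have := hC _ h
              exact ⟨by omega, this.2.1, this.2.2⟩
            · simp at h
              subst h
              have h1 := hQ ((n:Int)) List.mem_cons_self
              exact ⟨le_refl _, h1.1, by omega⟩)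
          (by intro hcn; exact absurd hcn (by simp))
          (by
            intro _
            exact List.mem_append_right _ (by simp))
          hQ2bd (by omega) (by omega)
          (by
            rw [hmv, List.filter_append]
            congr 1
            simp only [List.filter_cons, List.filter_nil]
            rw [if_pos (by simp; omega)])
          hz
      · set J := (n + 1 + (PySem.Int.mod (-t) M).toNat) % M.toNat with hJdef
        by_cases hpos : 0 < beltB.getD J 0
        · -- the robot moves forward and wears the next cell down
          have hA : innerA (beltB.rotate (PySem.Int.mod (-t) M).toNat, occ) ((n:Int))
              = ((beltB.rotate (PySem.Int.mod (-t) M).toNat).set (n+1)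
                   ((beltB.rotate (PySem.Int.mod (-t) M).toNat).getD (n+1) 0 - 1),
                 (occ.set n false).set (n+1) true) := by
            simp only [innerA]
            rw [show ((n:Int)).toNat = n by omega,
                show ((n:Int) + 1).toNat = n + 1 by omega]
            rw [if_pos ⟨hvn, by rw [hvn1]; simp; omega, by rw [hbA]; exact hpos⟩]
          have hB : moveStep N M t (beltB, zeros, moved, prev) ((n:Int))
              = (beltB.set J (beltB.getD J 0 - 1),
                 (if beltB.getD J 0 - 1 = 0 then zeros + 1 else zeros),
                 (if ((n:Int) + 1) ≠ N - 1 then moved ++ [(n:Int) + 1] else moved),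
                 ((n:Int) + 1)) := by
            simp only [moveStep]
            rw [if_pos (show ((n:Int) + 1) ≠ prev from hblock), hidx, if_pos hpos]
          have hrs : (beltB.set J (beltB.getD J 0 - 1)).rotate (PySem.Int.mod (-t) M).toNat
              = (beltB.rotate (PySem.Int.mod (-t) M).toNat).set (n+1)
                  ((beltB.rotate (PySem.Int.mod (-t) M).toNat).getD (n+1) 0 - 1) := by
            rw [hbA]
            have h := rotate_set beltB (PySem.Int.mod (-t) M).toNat (n+1) (by omega)
              (beltB.getD J 0 - 1)
            rw [hbl] at h
            exact h
          rw [hA, hB, ← hrs]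
          exact ihn Q2 (C ++ [(n:Int) + 1])
            (if ((n:Int) + 1) ≠ N - 1 then moved ++ [(n:Int) + 1] else moved)
            (beltB.set J (beltB.getD J 0 - 1))
            ((occ.set n false).set (n+1) true)
            (if beltB.getD J 0 - 1 = 0 then zeros + 1 else zeros)
            ((n:Int) + 1)
            (by simp [hbl]) (by simp [hol])
            (by
              intro j hj
              rw [getD_set' _ _ _ _ _ (by simp [hol]; omega),
                  getD_set' _ _ _ _ _ (by rw [hol]; omega)]
              by_cases h1 : n + 1 = j
              · rw [if_pos h1]
                have hmm : ((j:Int)) ∈ (C ++ [(n:Int) + 1]) ++ Q2 := by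
                  rw [List.append_assoc]
                  exact List.mem_append_right _ (by simp; omega)
                exact (decide_eq_true hmm).symm
              · rw [if_neg h1]
                by_cases h2 : n = j
                · rw [if_pos h2]
                  have hmm : ((j:Int)) ∉ (C ++ [(n:Int) + 1]) ++ Q2 := by
                    intro hmm
                    rcases List.mem_append.mp hmm with h | h
                    · rcases List.mem_append.mp h with h | h
                      · have h5 := (hC _ h).1
                        omega
                      · simp at h
                        omega
                    · have := (hQ2bd _ h).2
                      omega
                  exact (decide_eq_false hmm).symm
                · rw [if_neg h2, hom j hj, decide_eq_decide]
                  constructor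
                  · intro hmm
                    rcases List.mem_append.mp hmm with h | h
                    · exact List.mem_append_left _ (List.mem_append_left _ h)
                    · rcases List.mem_cons.mp h with h | h
                      · exfalso
                        omega
                      · exact List.mem_append_right _ h
                  · intro hmm
                    rcases List.mem_append.mp hmm with h | h
                    · rcases List.mem_append.mp h with h | h
                      · exact List.mem_append_left _ h
                      · exfalso
                        simp at h
                        omega
                    · exact List.mem_append_right _ (List.mem_cons_of_mem _ h))
            (by
              rw [List.append_assoc]
              rw [List.pairwise_append] at hpw ⊢
              obtain ⟨hpC, hpQ, hcross⟩ := hpw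
              refine ⟨hpC, ?_, ?_⟩
              · rw [List.singleton_append, List.pairwise_cons] at ⊢
                rw [List.pairwise_cons] at hpQ
                refine ⟨?_, hpQ.2⟩
                intro x hx
                have := (hQ2bd _ hx).2
                omega
              · intro a ha b hb
                have hac := (hC _ ha).1
                rcases List.mem_cons.mp hb with h | h
                · subst h
                  omega
                · exact hcross a ha b (List.mem_cons_of_mem _ h))
            (by
              intro c hc
              rcases List.mem_append.mp hc with h | h
              · have := hC _ h
                exact ⟨by omega, this.2.1, this.2.2⟩
              · simp at h
                subst h
                exact ⟨le_refl _, by omega, by omega⟩)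
            (by intro hcn; exact absurd hcn (by simp))
            (by
              intro _
              exact List.mem_append_right _ (by simp))
            hQ2bd (by omega) (by omega)
            (by
              rw [hmv, List.filter_append]
              by_cases hnn : ((n:Int) + 1) = N - 1
              · rw [if_neg (by omega)]
                simp [hnn]
              · rw [if_pos (by omega)]
                simp [hnn])
            (by
              have hcnt := count_after_dec beltB J (by omega) hpos
              rw [hz]
              split_ifs with hv0
              · rw [hcnt, if_pos hv0]
              · rw [hcnt, if_neg hv0]
                ring)
        · -- next cell worn out: the robot stays put
          have hA : innerA (beltB.rotate (PySem.Int.mod (-t) M).toNat, occ) ((n:Int))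
              = (beltB.rotate (PySem.Int.mod (-t) M).toNat, occ) := by
            simp only [innerA]
            rw [if_neg]
            rintro ⟨-, -, h3⟩
            rw [show ((n:Int) + 1).toNat = n + 1 by omega, hbA] at h3
            exact hpos h3
          have hB : moveStep N M t (beltB, zeros, moved, prev) ((n:Int))
              = (beltB, zeros, moved ++ [(n:Int)], ((n:Int))) := by
            simp only [moveStep]
            rw [if_pos (show ((n:Int) + 1) ≠ prev from hblock), hidx, if_neg hpos, if_pos (show ((n:Int)) ≠ N - 1 by omega)]
          rw [hA, hB]
          exact ihn Q2 (C ++ [(n:Int)]) (moved ++ [(n:Int)]) beltB occ zeros ((n:Int))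
            hbl hol
            (by
              intro j hj
              rw [hom j hj, decide_eq_decide, List.append_assoc]
              simp)
            (by rw [List.append_assoc]; simpa using hpw)
            (by
              intro c hc
              rcases List.mem_append.mp hc with h | h
              · have := hC _ h
                exact ⟨by omega, this.2.1, this.2.2⟩
              · simp at h
                subst h
                have h1 := hQ ((n:Int)) List.mem_cons_self
                exact ⟨le_refl _, h1.1, by omega⟩)
            (by intro hcn; exact absurd hcn (by simp))
            (by
              intro _
              exact List.mem_append_right _ (by simp))
            hQ2bd (by omega) (by omega)
            (by
              rw [hmv, List.filter_append]
              congr 1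
              simp only [List.filter_cons, List.filter_nil]
              rw [if_pos (by simp; omega)])
            hz

-- rotation of the occupancy deque followed by robot[-1]=False, in membership terms
theorem rot_occ (N : Int) (hN : 0 < N) (occ : List Bool) (P : List Int)
    (hlen : occ.length = N.toNat)
    (hmem : ∀ j : Nat, j < N.toNat → occ.getD j false = decide ((j:Int) ∈ P))
    (hbd : ∀ x ∈ P, 0 ≤ x ∧ x ≤ N - 1 ∧ (2 ≤ N → x ≤ N - 2)) :
    ∀ j : Nat, j < N.toNat →
      ((occ.getLastD false :: occ.dropLast).set (N.toNat - 1) false).getD j false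
        = decide ((j:Int) ∈ Qof N P) := by
  intro j hj
  have hne : occ ≠ [] := by
    intro h; rw [h] at hlen; simp at hlen; omega
  rw [rot_last occ false hne, hlen]
  have hll : (occ.rotate (N.toNat - 1)).length = N.toNat := by simp [hlen]
  have hgd : ((occ.rotate (N.toNat - 1)).set (N.toNat - 1) false).getD j false
      = if N.toNat - 1 = j then false else (occ.rotate (N.toNat - 1)).getD j false := by
    rw [List.getD_eq_getElem _ _ (by rw [List.length_set, hll]; exact hj), List.getElem_set]
    split_ifs with h
    · rfl
    · exact (List.getD_eq_getElem _ _ (by rw [hll]; exact hj)).symm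
  rw [hgd]
  by_cases hja : N.toNat - 1 = j
  · rw [if_pos hja]
    symm
    rw [decide_eq_false_iff_not]
    intro hmemQ
    rw [mem_Qof] at hmemQ
    omega
  · rw [if_neg hja]
    rw [getD_rotate occ (N.toNat - 1) j (by rw [hlen]; exact hj) false, hlen]
    by_cases hj0 : j = 0
    · subst hj0
      have hidx : (0 + (N.toNat - 1)) % N.toNat = N.toNat - 1 := by
        rw [Nat.zero_add, Nat.mod_eq_of_lt (by omega)]
      rw [hidx, hmem _ (by omega)]
      have hN2' : 2 ≤ N := by omega
      have h1 : ((N.toNat - 1 : Nat) : Int) ∉ P := by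
        intro hm
        have := (hbd _ hm).2.2 hN2'
        omega
      have h2 : (0:Int) ∉ Qof N P := by
        intro hm
        rw [mem_Qof] at hm
        have := (hbd _ hm.1).1
        omega
      simp [h1, h2]
    · have hidx : (j + (N.toNat - 1)) % N.toNat = j - 1 := by
        rw [show j + (N.toNat - 1) = (j - 1) + N.toNat by omega, Nat.add_mod_right,
            Nat.mod_eq_of_lt (by omega)]
      rw [hidx, hmem _ (by omega), decide_eq_decide, mem_Qof]
      constructor
      · intro hm
        exact ⟨by rw [show (j:Int) - 1 = ((j - 1 : Nat) : Int) by omega]; exact hm, by omega⟩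
      · rintro ⟨hm, _⟩
        rw [show ((j - 1 : Nat) : Int) = (j:Int) - 1 by omega]
        exact hm

-- main loop lockstep
theorem loop_eq (N K M : Int) (hN : 0 < N) (hM : 0 < M) (hNM : N ≤ M) :
    ∀ (fuel : Nat) (beltB : List Int) (P : List Int) (occ : List Bool) (t0 : Int),
    beltB.length = M.toNat →
    occ.length = N.toNat →
    (∀ j : Nat, j < N.toNat → occ.getD j false = decide ((j:Int) ∈ P)) →
    List.Pairwise (· > ·) P →
    (∀ x ∈ P, 0 ≤ x ∧ x ≤ N - 1 ∧ (2 ≤ N → x ≤ N - 2)) →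
    loopA N K fuel (beltB.rotate (PySem.Int.mod (-t0) M).toNat) occ t0
      = loopB N K M fuel beltB (beltB.count 0 : Int) P t0 := by
  intro fuel
  induction fuel with
  | zero => intro beltB P occ t0 _ _ _ _ _; rfl
  | succ fuel ih =>
    intro beltB P occ t0 hbl hol hom hpw hbd
    have hNn : 0 < N.toNat := by omega
    have hMn : 0 < M.toNat := by omega
    have hobt0 : 0 ≤ PySem.Int.mod (-(t0+1)) M := ob_nonneg M (t0+1) hM
    have hobt1 : PySem.Int.mod (-(t0+1)) M < M := ob_lt M (t0+1) hM
    simp only [loopA, loopB, stepA, List.length_cons, List.length_dropLast, hol,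
      Nat.sub_add_cancel hNn]
    have hrotb : (beltB.rotate (PySem.Int.mod (-t0) M).toNat).getLastD 0 ::
        (beltB.rotate (PySem.Int.mod (-t0) M).toNat).dropLast
        = beltB.rotate (PySem.Int.mod (-(t0+1)) M).toNat := by
      rw [rot_advance beltB 0 M (PySem.Int.mod (-t0) M) hM (ob_nonneg M t0 hM)
            (ob_lt M t0 hM) hbl, ob_advance M t0 hM]
    rw [hrotb, show (N:Int) - 2 = ((((N-1).toNat : Nat)):Int) - 1 by omega,
        fold_stepRobot_eq N M (t0+1) P]
    have hr2len : ((occ.getLastD false :: occ.dropLast).set (N.toNat - 1) false).length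
        = N.toNat := by
      rw [List.length_set, List.length_cons, List.length_dropLast, hol]
      omega
    have hom2 : ∀ j : Nat, j < N.toNat →
        ((occ.getLastD false :: occ.dropLast).set (N.toNat - 1) false).getD j false
          = decide ((j:Int) ∈ ([] : List Int) ++ Qof N P) := by
      intro j hj
      rw [List.nil_append]
      exact rot_occ N hN occ P hol hom hbd j hj
    obtain ⟨C', h1, h2, h3, h4, h5, h6, h7, h8⟩ :=
      sweep_rel N M (t0+1) hN hM hNM (N-1).toNat (Qof N P) [] [] beltB
        ((occ.getLastD false :: occ.dropLast).set (N.toNat - 1) false)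
        ((beltB.count 0 : Int)) N hbl hr2len hom2
        (by
          rw [List.nil_append]
          exact (hpw.map (· + 1) (fun a b h => by show a + 1 > b + 1; omega)).filter _)
        (by intro c hc; exact absurd hc (List.not_mem_nil))
        (by intro _; rfl)
        (by intro h; exact absurd rfl h)
        (by
          intro x hx
          rw [mem_Qof] at hx
          have := (hbd _ hx.1).1
          omega)
        (by omega) (by omega) rfl rfl
    set stA := List.foldl innerA
        (beltB.rotate (PySem.Int.mod (-(t0+1)) M).toNat,
          (occ.getLastD false :: occ.dropLast).set (N.toNat - 1) false)
        (PySem.List.pyRange ((((N-1).toNat : Nat) : Int) - 1) (-1) (-1)) with hstA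
    set sB := List.foldl (moveStep N M (t0+1)) (beltB, ((beltB.count 0 : Int)), [], N)
        (Qof N P) with hsB
    have hobtlt : (PySem.Int.mod (-(t0+1)) M).toNat < M.toNat := by omega
    have hg0 : stA.1.getD 0 0 = sB.1.getD (PySem.Int.mod (-(t0+1)) M).toNat 0 := by
      rw [h1, getD_rotate _ _ _ (by rw [h4]; omega) 0, h4, Nat.zero_add,
          Nat.mod_eq_of_lt hobtlt]
    -- the final clear of the unload cell, in membership terms
    have hom3 : ∀ j : Nat, j < N.toNat →
        (stA.2.set (N.toNat - 1) false).getD j false = decide ((j:Int) ∈ sB.2.2.1) := by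
      intro j hj
      rw [h6, getD_set' _ _ _ _ _ (by rw [h2]; exact hj)]
      by_cases hje : N.toNat - 1 = j
      · rw [if_pos hje]
        symm
        rw [decide_eq_false_iff_not]
        intro hmm
        have := List.of_mem_filter hmm
        simp at this
        omega
      · rw [if_neg hje, h3 j hj, decide_eq_decide, List.mem_filter]
        constructor
        · intro hmm
          exact ⟨hmm, by simp; omega⟩
        · intro hmm
          exact hmm.1
    rw [h2, hg0]
    by_cases hload : 0 < sB.1.getD (PySem.Int.mod (-(t0+1)) M).toNat 0
    · simp only [if_pos hload]
      have hsetrot : stA.1.set 0 (sB.1.getD (PySem.Int.mod (-(t0+1)) M).toNat 0 - 1)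
          = (sB.1.set (PySem.Int.mod (-(t0+1)) M).toNat
                (sB.1.getD (PySem.Int.mod (-(t0+1)) M).toNat 0 - 1)).rotate
              (PySem.Int.mod (-(t0+1)) M).toNat := by
        rw [h1]
        have h := rotate_set sB.1 (PySem.Int.mod (-(t0+1)) M).toNat 0 (by omega)
          (sB.1.getD (PySem.Int.mod (-(t0+1)) M).toNat 0 - 1)
        rw [h4, Nat.zero_add, Nat.mod_eq_of_lt hobtlt] at h
        exact h.symm
      rw [hsetrot, count_rotate_int]
      have hcnt : ((sB.1.set (PySem.Int.mod (-(t0+1)) M).toNat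
            (sB.1.getD (PySem.Int.mod (-(t0+1)) M).toNat 0 - 1)).count 0 : Int)
          = (if sB.1.getD (PySem.Int.mod (-(t0+1)) M).toNat 0 - 1 = 0 then sB.2.1 + 1
             else sB.2.1) := by
        rw [count_after_dec _ _ (by rw [h4]; omega) hload, h5]
        split_ifs <;> ring
      rw [hcnt]
      by_cases hK : K ≤ (if sB.1.getD (PySem.Int.mod (-(t0+1)) M).toNat 0 - 1 = 0
          then sB.2.1 + 1 else sB.2.1)
      · rw [if_pos hK, if_pos hK]
      · rw [if_neg hK, if_neg hK]
        have := ih (sB.1.set (PySem.Int.mod (-(t0+1)) M).toNat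
            (sB.1.getD (PySem.Int.mod (-(t0+1)) M).toNat 0 - 1))
          (sB.2.2.1 ++ [0])
          ((stA.2.set (N.toNat - 1) false).set 0 true) (t0+1)
          (by rw [List.length_set, h4])
          (by rw [List.length_set, List.length_set, h2])
          (by
            intro j hj
            rw [getD_set' _ _ _ _ _ (by rw [List.length_set, h2]; exact hj)]
            by_cases hj0 : 0 = j
            · rw [if_pos hj0]
              have : ((j:Int)) ∈ sB.2.2.1 ++ [0] :=
                List.mem_append_right _ (by simp; omega)
              exact (decide_eq_true this).symm
            · rw [if_neg hj0, hom3 j hj, decide_eq_decide]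
              constructor
              · intro hmm
                exact List.mem_append_left _ hmm
              · intro hmm
                rcases List.mem_append.mp hmm with h | h
                · exact h
                · exfalso
                  simp at h
                  omega)
          (by
            rw [h6, List.pairwise_append]
            refine ⟨h7.filter _, by simp, ?_⟩
            intro a ha b hb
            simp at hb
            subst hb
            have := (h8 _ (List.mem_of_mem_filter ha)).1
            omega)
          (by
            intro x hx
            rcases List.mem_append.mp hx with h | h
            · have hx' : x ∈ List.filter (fun c => decide (c ≠ N - 1)) C' := by
                rw [← h6]
                exact h
              have hb8 := h8 _ (List.mem_of_mem_filter hx')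
              have hne := List.of_mem_filter hx'
              simp at hne
              exact ⟨by omega, by omega, by intro _; omega⟩
            · simp at h
              subst h
              exact ⟨le_refl _, by omega, by intro _; omega⟩)
        rw [hcnt] at this
        exact this
    · simp only [if_neg hload]
      rw [h1, count_rotate_int, ← h5]
      by_cases hK : K ≤ sB.2.1
      · rw [if_pos hK, if_pos hK]
      · rw [if_neg hK, if_neg hK]
        have := ih sB.1 sB.2.2.1 (stA.2.set (N.toNat - 1) false) (t0+1)
          h4
          (by rw [List.length_set, h2])
          hom3
          (by rw [h6]; exact h7.filter _)
          (by
            intro x hx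
            have hx' : x ∈ List.filter (fun c => decide (c ≠ N - 1)) C' := by
              rw [← h6]
              exact hx
            have hb8 := h8 _ (List.mem_of_mem_filter hx')
            have hne := List.of_mem_filter hx'
            simp at hne
            exact ⟨by omega, by omega, by intro _; omega⟩)
        rw [← h5] at this
        exact this

-- the K ≤ 0 path: with no robots on the belt both programs return 1 on the first step
theorem getD_replicate_false (n j : Nat) : (List.replicate n false).getD j false = false := by
  rw [List.getD_eq_getElem?_getD]
  rcases Nat.lt_or_ge j n with h | h
  · rw [List.getElem?_eq_getElem (by simpa using h)]
    simp
  · rw [List.getElem?_eq_none (by simpa using h)]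
    rfl

theorem set_replicate_false (n j : Nat) :
    (List.replicate n false).set j false = List.replicate n false := by
  apply List.ext_getElem
  · simp
  · intro i h1 h2
    rw [List.getElem_set]
    split_ifs <;> simp

theorem foldl_innerA_id (l : List Int) (belt : List Int) (n : Nat) :
    l.foldl innerA (belt, List.replicate n false) = (belt, List.replicate n false) := by
  induction l with
  | nil => rfl
  | cons a l ihl =>
    simp only [List.foldl_cons, innerA, getD_replicate_false]
    simp only [Bool.false_eq_true, false_and, if_false]
    exact ihl

theorem dropLast_getLastD_replicate (n : Nat) (hn : 0 < n) :
    (List.replicate n false).getLastD false :: (List.replicate n false).dropLast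
      = List.replicate n false := by
  rcases n with _ | m
  · omega
  · rw [List.dropLast_replicate]
    have hlast : (List.replicate (m+1) false).getLastD false = false := by
      rcases Nat.eq_or_lt_of_le (Nat.succ_le_of_lt (Nat.succ_pos m)) with h | h
      · simp [List.getLastD_eq_getLast?, List.getLast?_replicate]
      · simp [List.getLastD_eq_getLast?, List.getLast?_replicate]
    rw [hlast]
    simp [List.replicate_succ]

theorem stepA_count_nonneg_first (N K : Int) (belt : List Int) (n : Nat) (hn : 0 < n)
    (hK : K ≤ 0) (fuel : Nat) :
    loopA N K (fuel + 1) belt (List.replicate n false) 0 = 1 := by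
  simp only [loopA, stepA]
  rw [dropLast_getLastD_replicate n hn, set_replicate_false, foldl_innerA_id]
  dsimp only
  have hcnt : ∀ (l : List Int), K ≤ (l.count 0 : Int) := by
    intro l
    have := Int.natCast_nonneg (l.count 0)
    omega
  split_ifs with h1 h2 h3
  · norm_num
  · exfalso; omega
  · norm_num
  · exfalso; omega

theorem loopB_nonneg_first (N K M : Int) (belt : List Int) (hK : K ≤ 0) (fuel : Nat) :
    loopB N K M (fuel + 1) belt (belt.count 0 : Int) [] 0 = 1 := by
  simp only [loopB, List.foldl_nil]
  have h0 : (0:Int) ≤ (belt.count 0 : Int) := Int.natCast_nonneg _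
  split_ifs with h1 h2 h3 h4 h5 <;> omega


theorem solve_spec : Claim_equal_solve := by
  intro N K Ai _ hpre
  obtain ⟨hN1, hlen1, _, hdisj⟩ := hpre
  unfold Spec_solve solve solve_alt
  have hN : 0 < N := by omega
  rcases hdisj with hNM | hK0
  · have h := loop_eq N K (Ai.length : Int) hN (by omega) hNM (pvFuel N Ai) Ai []
      (List.replicate N.toNat false) 0 (by omega) (by simp)
      (by intro j hj; rw [getD_replicate_false]; simp) (by simp) (by simp)
    have hob : (PySem.Int.mod (-(0:Int)) (Ai.length : Int)).toNat = 0 := by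
      simp [PySem.Int.mod]
    rw [hob, List.rotate_zero] at h
    exact h
  · rw [show pvFuel N Ai
        = ((N.toNat + Ai.length + 1) * ((Ai.foldl (fun s x => s + max x 0) 0).toNat + 2)) + 1
        from rfl]
    rw [stepA_count_nonneg_first N K Ai N.toNat (by omega) hK0,
        loopB_nonneg_first N K (Ai.length : Int) Ai hK0]
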